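-- pv_equiv track=rewrite | github.com/crobil/project | range_extraction.py | solution
-- ===== SOURCE A (Python) =====
-- def solution(args):
--     out = ''
--     flag = False
--     out += '%d' % args[0]
--     for idx in range(1,len(args)):
--         if args[idx] - args[idx-1] == 1:
--             if flag == True and idx == len(args)-1:
--                 out += '%d' % args[idx]
--             elif flag == False and idx == len(args)-1:
--                 out += ',%d' % args[idx]
--             elif flag == True:
--                 continue
--             elif args[idx] - args[idx+1] == -1:
--                     flag = True
--                     out += '-'
--             else:
--                 out += ',%d' % args[idx]
--         else:
--             if flag == True:
--                 out += '%d,%d' % (args[idx-1], args[idx])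
--                 flag = False
--             else:
--                 out += ',%d' % args[idx]
--                 flag = False
--     return out
-- ===== SOURCE B (Python) =====
-- def solution(args):
--     # Two-phase: group into (start, end) runs of consecutive ints, then format each run.
--     runs = []
--     start = end = args[0]
--     for x in args[1:]:
--         if x == end + 1:
--             end = x
--         else:
--             runs.append((start, end))
--             start = end = x
--     runs.append((start, end))
--     parts = []
--     for s, e in runs:
--         if e == s:
--             parts.append('%d' % s)
--         elif e == s + 1:
--             parts.append('%d,%d' % (s, e))
--         else:
--             parts.append('%d-%d' % (s, e))
--     return ','.join(parts)
-- ===== Notes on version B (the rewrite author's own statement) =====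
-- stated objective: simpler
-- what changed: Replaced A's single-pass flag automaton with its args[idx+1] lookahead and four-way branch by a two-phase decomposition: group the input into (start,end) runs of consecutive integers, format each run (1 element -> 'a', 2 -> 'a,b', >=3 -> 'a-b'), and join with commas.
import Mathlib
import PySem

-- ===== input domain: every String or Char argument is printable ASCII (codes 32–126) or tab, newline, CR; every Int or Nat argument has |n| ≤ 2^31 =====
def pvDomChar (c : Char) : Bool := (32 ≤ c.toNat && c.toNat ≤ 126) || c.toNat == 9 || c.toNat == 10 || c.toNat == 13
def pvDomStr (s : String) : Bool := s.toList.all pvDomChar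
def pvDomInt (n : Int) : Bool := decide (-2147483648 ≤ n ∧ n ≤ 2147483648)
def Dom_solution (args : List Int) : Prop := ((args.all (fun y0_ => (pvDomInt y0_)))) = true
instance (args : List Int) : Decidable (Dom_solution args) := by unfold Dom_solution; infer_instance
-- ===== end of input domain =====

-- B replaces A's one-pass flag automaton (with its args[idx+1] lookahead) by a two-phase
-- decomposition: group into (start,end) runs of consecutive ints, then format and join (objective: simpler).

-- ===== PORT A =====
-- A's for-loop over idx ∈ range(1, len(args)); the position is carried as the remaining
-- suffix s = args[idx:] together with prev = args[idx-1]; 'idx == len(args)-1' is rest = [],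
-- args[idx+1] is the head of rest (in range whenever Python reads it, since idx ≠ len(args)-1 there).
def solutionGo (prev : Int) (flag : Bool) (s : List Int) (out : String) : String :=
  match s with
  | [] => out
  | x :: rest =>
    if x - prev = 1 then
      if flag = true ∧ rest = [] then
        solutionGo x flag rest (out ++ PySem.Int.toStr x)
      else if flag = false ∧ rest = [] then
        solutionGo x flag rest (out ++ "," ++ PySem.Int.toStr x)
      else if flag = true then
        solutionGo x flag rest out
      else
        -- args[idx+1] is rest.head; rest ≠ [] whenever this branch runs (an earlier branch
        -- catches idx = len(args)-1), so headD's default is never read (Python would raise there)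
        if x - (rest.headD 0) = -1 then
          solutionGo x true rest (out ++ "-")
        else
          solutionGo x flag rest (out ++ "," ++ PySem.Int.toStr x)
    else
      if flag = true then
        solutionGo x false rest (out ++ PySem.Int.toStr prev ++ "," ++ PySem.Int.toStr x)
      else
        solutionGo x false rest (out ++ "," ++ PySem.Int.toStr x)

def solution (args : List Int) : String :=
  match args with
  | [] => ""  -- Python raises IndexError on args[0]; excluded by Pre_solution
  | a :: rest => solutionGo a false rest (PySem.Int.toStr a)

-- ===== PORT B =====
-- grouping loop of Source B: current run is (start, e), remaining input s; emits (start,end) pairs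
def solutionAltRuns (start e : Int) (s : List Int) : List (Int × Int) :=
  match s with
  | [] => [(start, e)]
  | x :: rest => if x = e + 1 then solutionAltRuns start x rest
                 else (start, e) :: solutionAltRuns x x rest

-- formatting of one run, as in Source B's second loop
def solutionAltFmt (r : Int × Int) : String :=
  if r.2 = r.1 then PySem.Int.toStr r.1
  else if r.2 = r.1 + 1 then PySem.Int.toStr r.1 ++ "," ++ PySem.Int.toStr r.2
  else PySem.Int.toStr r.1 ++ "-" ++ PySem.Int.toStr r.2

def solution_alt (args : List Int) : String :=
  match args with
  | [] => ""  -- Python raises IndexError on args[0]; excluded by Pre_solution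
  | a :: rest => PySem.Str.join "," ((solutionAltRuns a a rest).map solutionAltFmt)

-- ===== PRECONDITION & SPEC =====
-- Pre_ excludes only the empty list, on which both A and B raise IndexError (args[0]).
def Pre_solution (args : List Int) : Prop := args ≠ []
instance (args : List Int) : Decidable (Pre_solution args) := by unfold Pre_solution; infer_instance
def pvWitness_solution : List Int := [1, 2, 3, 7]
def Spec_solution (args : List Int) (out : String) : Prop := out = solution_alt args
instance (args : List Int) (out : String) : Decidable (Spec_solution args out) := by unfold Spec_solution; infer_instance

-- ===== CLAIM (what is proved, stated in full; the proofs are below) =====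
def Claim_equal_solution : Prop := ∀ (args : List Int), Dom_solution args → Pre_solution args → Spec_solution args (solution args)

-- ===== LEMMAS AND PROOFS =====

-- strings are equal iff their character lists are
theorem strEqOfToList (a b : String) (h : a.toList = b.toList) : a = b := by
  have := congrArg String.ofList h
  simpa using this

theorem joinOne (a : String) : PySem.Str.join "," [a] = a := by
  apply strEqOfToList
  simp [PySem.Str.toList_join, PySem.Chars.join_singleton]

theorem joinCC (a b : String) (l : List String) :
    PySem.Str.join "," (a :: b :: l) = a ++ "," ++ PySem.Str.join "," (b :: l) := by
  apply strEqOfToList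
  simp [PySem.Str.toList_join, PySem.Chars.join_cons_cons]

-- end of the run that currently ends at e, over the remaining input s
def runEnd (e : Int) (s : List Int) : Int :=
  match s with
  | [] => e
  | x :: rest => if x = e + 1 then runEnd x rest else e

-- the runs strictly after the current one
def runTail (e : Int) (s : List Int) : List (Int × Int) :=
  match s with
  | [] => []
  | x :: rest => if x = e + 1 then runTail x rest else solutionAltRuns x x rest

theorem runsB_eq (s : List Int) : ∀ start e : Int,
    solutionAltRuns start e s = (start, runEnd e s) :: runTail e s := by
  induction s with
  | nil => intro start e; simp [solutionAltRuns, runEnd, runTail]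
  | cons x rest ih =>
    intro start e
    simp only [solutionAltRuns, runEnd, runTail]
    by_cases h : x = e + 1 <;> simp [h, ih]

theorem runEnd_ge (s : List Int) : ∀ e : Int, e ≤ runEnd e s := by
  induction s with
  | nil => intro e; simp [runEnd]
  | cons x rest ih =>
    intro e
    simp only [runEnd]
    by_cases h : x = e + 1
    · simp only [h, ite_true]
      have := ih (e + 1)
      omega
    · simp [h]

-- "," ++ formatted run, for each run after the first
def tailJoin (rs : List (Int × Int)) : String :=
  match rs with
  | [] => ""
  | r :: rest => "," ++ solutionAltFmt r ++ tailJoin rest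

theorem join_eq (rs : List (Int × Int)) : ∀ r : Int × Int,
    PySem.Str.join "," ((r :: rs).map solutionAltFmt) = solutionAltFmt r ++ tailJoin rs := by
  induction rs with
  | nil => intro r; simp [tailJoin, joinOne]
  | cons q qs ih =>
    intro r
    simp only [List.map_cons] at *
    rw [joinCC, ih q]
    simp [tailJoin, String.append_assoc]

theorem fmt_single (a : Int) : solutionAltFmt (a, a) = PySem.Int.toStr a := by
  simp [solutionAltFmt]

theorem fmt_pair (a : Int) : solutionAltFmt (a, a + 1) = PySem.Int.toStr a ++ "," ++ PySem.Int.toStr (a + 1) := by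
  simp [solutionAltFmt]

theorem fmt_dash (a e : Int) (h1 : e ≠ a) (h2 : e ≠ a + 1) :
    solutionAltFmt (a, e) = PySem.Int.toStr a ++ "-" ++ PySem.Int.toStr e := by
  simp [solutionAltFmt, h1, h2]

-- one-step unfolding of the loop body (definitional)
theorem go_nil (prev : Int) (flag : Bool) (out : String) : solutionGo prev flag [] out = out := rfl

theorem go_cons_eq (prev : Int) (flag : Bool) (x : Int) (rest : List Int) (out : String) :
    solutionGo prev flag (x :: rest) out =
      (if x - prev = 1 then
        if flag = true ∧ rest = [] then solutionGo x flag rest (out ++ PySem.Int.toStr x)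
        else if flag = false ∧ rest = [] then solutionGo x flag rest (out ++ "," ++ PySem.Int.toStr x)
        else if flag = true then solutionGo x flag rest out
        else if x - (rest.headD 0) = -1 then solutionGo x true rest (out ++ "-")
        else solutionGo x flag rest (out ++ "," ++ PySem.Int.toStr x)
      else if flag = true then solutionGo x false rest (out ++ PySem.Int.toStr prev ++ "," ++ PySem.Int.toStr x)
      else solutionGo x false rest (out ++ "," ++ PySem.Int.toStr x)) := rfl

-- the accumulator only ever grows on the right
theorem go_append (s : List Int) : ∀ (prev : Int) (flag : Bool) (out1 out2 : String),
    solutionGo prev flag s (out1 ++ out2) = out1 ++ solutionGo prev flag s out2 := by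
  induction s with
  | nil => intros; simp [go_nil]
  | cons x rest ih =>
    intro prev flag out1 out2
    rw [go_cons_eq, go_cons_eq]
    split_ifs <;> (try simp only [String.append_assoc]) <;> exact ih ..

theorem go_out (s : List Int) (prev : Int) (flag : Bool) (out : String) :
    solutionGo prev flag s out = out ++ solutionGo prev flag s "" := by
  have h := go_append s prev flag out ""
  simpa using h

-- the simultaneous invariant: flag=false means prev is a fully printed run start,
-- flag=true means the current run's start and '-' are printed and prev is its pending end
theorem main_inv (s : List Int) :
    (∀ prev : Int, PySem.Int.toStr prev ++ solutionGo prev false s "" =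
        solutionAltFmt (prev, runEnd prev s) ++ tailJoin (runTail prev s)) ∧
    (∀ prev : Int, s ≠ [] → solutionGo prev true s "" =
        PySem.Int.toStr (runEnd prev s) ++ tailJoin (runTail prev s)) := by
  induction s with
  | nil =>
    refine ⟨fun prev => ?_, fun prev h => absurd rfl h⟩
    simp [go_nil, runEnd, runTail, tailJoin, fmt_single]
  | cons x rest ih =>
    obtain ⟨ih1, ih2⟩ := ih
    constructor
    · -- flag = false
      intro prev
      rw [go_cons_eq]
      by_cases h1 : x - prev = 1
      · have hx : x = prev + 1 := by omega
        match rest with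
        | [] =>
          have c1 : ¬((false : Bool) = true ∧ ([] : List Int) = []) := by simp
          rw [if_pos h1, if_neg c1, if_pos ⟨rfl, rfl⟩, go_nil]
          have hE : runEnd prev [x] = x := by simp only [runEnd]; rw [if_pos hx]
          have hT : runTail prev [x] = [] := by simp only [runTail]; rw [if_pos hx]
          have hpair : solutionAltFmt (prev, x) = PySem.Int.toStr prev ++ "," ++ PySem.Int.toStr x := by
            rw [hx]; exact fmt_pair prev
          rw [hE, hT, hpair]
          simp [tailJoin, String.append_assoc]
        | y :: rest' =>
          have c1 : ¬((false : Bool) = true ∧ y :: rest' = ([] : List Int)) := by simp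
          have c2 : ¬((false : Bool) = false ∧ y :: rest' = ([] : List Int)) := by simp
          have c3 : ¬((false : Bool) = true) := by simp
          rw [if_pos h1, if_neg c1, if_neg c2, if_neg c3]
          by_cases h5 : x - (List.headD (y :: rest') 0) = -1
          · -- a dash is emitted
            have hy : y = x + 1 := by simp only [List.headD_cons] at h5; omega
            rw [if_pos h5, go_out]
            have hE : runEnd prev (x :: y :: rest') = runEnd y rest' := by
              simp only [runEnd]; rw [if_pos hx, if_pos hy]
            have hT : runTail prev (x :: y :: rest') = runTail y rest' := by
              simp only [runTail]; rw [if_pos hx, if_pos hy]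
            have hge : y ≤ runEnd y rest' := runEnd_ge rest' y
            have h2 := ih2 x (by simp)
            have hE2 : runEnd x (y :: rest') = runEnd y rest' := by
              simp only [runEnd]; rw [if_pos hy]
            have hT2 : runTail x (y :: rest') = runTail y rest' := by
              simp only [runTail]; rw [if_pos hy]
            rw [h2, hE2, hT2, hE, hT,
              fmt_dash prev (runEnd y rest') (by omega) (by omega)]
            simp [String.append_assoc]
          · -- run of length exactly 2: ',%d'
            have hy : y ≠ x + 1 := by simp only [List.headD_cons] at h5; omega
            rw [if_neg h5, go_out]
            have hE2 : runEnd x (y :: rest') = x := by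
              simp only [runEnd]; rw [if_neg hy]
            have hT2 : runTail x (y :: rest') = solutionAltRuns y y rest' := by
              simp only [runTail]; rw [if_neg hy]
            have hE : runEnd prev (x :: y :: rest') = x := by
              simp only [runEnd]; rw [if_pos hx, if_neg hy]
            have hT : runTail prev (x :: y :: rest') = solutionAltRuns y y rest' := by
              simp only [runTail]; rw [if_pos hx, if_neg hy]
            have hmain := ih1 x
            rw [hE2, hT2, fmt_single] at hmain
            have hpair : solutionAltFmt (prev, x) = PySem.Int.toStr prev ++ "," ++ PySem.Int.toStr x := by
              rw [hx]; exact fmt_pair prev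
            rw [hE, hT, hpair]
            simp only [String.append_assoc, String.empty_append]
            rw [hmain]
      · -- not consecutive: a new run starts at x
        have hx : x ≠ prev + 1 := by omega
        have c3 : ¬((false : Bool) = true) := by simp
        rw [if_neg h1, if_neg c3, go_out]
        have hE : runEnd prev (x :: rest) = prev := by simp only [runEnd]; rw [if_neg hx]
        have hT : runTail prev (x :: rest) = solutionAltRuns x x rest := by
          simp only [runTail]; rw [if_neg hx]
        rw [hE, hT, fmt_single, runsB_eq rest x x]
        have hmain := ih1 x
        simp only [tailJoin]
        simp only [String.append_assoc, String.empty_append]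
        rw [hmain]
    · -- flag = true
      intro prev _
      rw [go_cons_eq]
      by_cases h1 : x - prev = 1
      · have hx : x = prev + 1 := by omega
        match rest with
        | [] =>
          rw [if_pos h1, if_pos ⟨rfl, rfl⟩, go_nil]
          have hE : runEnd prev [x] = x := by simp only [runEnd]; rw [if_pos hx]
          have hT : runTail prev [x] = [] := by simp only [runTail]; rw [if_pos hx]
          rw [hE, hT]
          simp [tailJoin]
        | y :: rest' =>
          have c1 : ¬((true : Bool) = true ∧ y :: rest' = ([] : List Int)) := by simp
          have c2 : ¬((true : Bool) = false ∧ y :: rest' = ([] : List Int)) := by simp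
          rw [if_pos h1, if_neg c1, if_neg c2, if_pos rfl]
          have h2 := ih2 x (by simp)
          rw [h2]
          have hE : runEnd prev (x :: y :: rest') = runEnd x (y :: rest') := by
            simp only [runEnd]; rw [if_pos hx]
          have hT : runTail prev (x :: y :: rest') = runTail x (y :: rest') := by
            simp only [runTail]; rw [if_pos hx]
          rw [hE, hT]
      · have hx : x ≠ prev + 1 := by omega
        rw [if_neg h1, if_pos rfl, go_out]
        have hE : runEnd prev (x :: rest) = prev := by simp only [runEnd]; rw [if_neg hx]
        have hT : runTail prev (x :: rest) = solutionAltRuns x x rest := by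
          simp only [runTail]; rw [if_neg hx]
        rw [hE, hT, runsB_eq rest x x]
        have hmain := ih1 x
        simp only [tailJoin]
        simp only [String.append_assoc, String.empty_append]
        rw [hmain]

-- ===== VERDICT (by name: the statement is the Claim_ definition above) =====
theorem solution_spec : Claim_equal_solution := by
  intro args _ hpre
  unfold Spec_solution
  match args with
  | [] => exact absurd rfl hpre
  | a :: rest =>
    simp only [solution, solution_alt]
    rw [runsB_eq rest a a, join_eq]
    rw [go_out rest a false (PySem.Int.toStr a)]
    exact (main_inv rest).1 a
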